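-- pv_equiv track=rewrite | github.com/RaoufOuanis/wsn-fss-simulation | runner.py | _make_seed_jobs
-- ===== SOURCE A (Python) =====
-- from typing import Any, Dict, List, Optional, Tuple
--
-- def _make_seed_jobs(prefix_base: str, total_seeds: int, parallel_jobs: int) -> List[Tuple[str, int, int]]:
--     """Split a fixed number of seeds across parallel jobs.
--
--     We keep seed uniqueness by assigning each job a contiguous seed block.
--     Each job runs `runs_job` seeds starting from `base_seed`.
--
--     Returns a list of (prefix, base_seed, runs_job).
--     """
--
--     total = int(total_seeds)
--     if total <= 0:
--         return []
--
--     nj = int(max(1, parallel_jobs))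
--     nj = min(nj, total)  # do not create empty jobs
--
--     base = total // nj
--     rem = total % nj
--
--     jobs: List[Tuple[str, int, int]] = []
--     seed0 = 0
--     for j in range(nj):
--         runs_job = base + (1 if j < rem else 0)
--         if runs_job <= 0:
--             continue
--         start = seed0
--         end = seed0 + runs_job - 1
--         suffix = f"s{start:02d}_{end:02d}"
--         jobs.append((f"{prefix_base}_{suffix}", int(seed0), int(runs_job)))
--         seed0 += runs_job
--
--     return jobs
-- ===== SOURCE B (Python) =====
-- from typing import List, Tuple
--
-- def _make_seed_jobs(prefix_base: str, total_seeds: int, parallel_jobs: int) -> List[Tuple[str, int, int]]: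
--     """Closed-form variant: each job's start index is computed directly as
--     j*base + min(j, rem), so no running accumulator is needed."""
--     total = int(total_seeds)
--     if total <= 0:
--         return []
--     nj = min(max(1, int(parallel_jobs)), total)
--     base, rem = divmod(total, nj)
--
--     def job(j: int) -> Tuple[str, int, int]:
--         start = j * base + min(j, rem)
--         runs = base + (1 if j < rem else 0)
--         return (f"{prefix_base}_s{start:02d}_{start + runs - 1:02d}", start, runs)
--
--     return [job(j) for j in range(nj)]
-- ===== Notes on version B (the rewrite author's own statement) =====
-- stated objective: alternative
-- what changed: B computes each job's start seed by the closed form j*base + min(j, rem) and builds the result as a stateless comprehension over range(nj), instead of threading a running seed0 accumulator through a loop with appends.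
import Mathlib
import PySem

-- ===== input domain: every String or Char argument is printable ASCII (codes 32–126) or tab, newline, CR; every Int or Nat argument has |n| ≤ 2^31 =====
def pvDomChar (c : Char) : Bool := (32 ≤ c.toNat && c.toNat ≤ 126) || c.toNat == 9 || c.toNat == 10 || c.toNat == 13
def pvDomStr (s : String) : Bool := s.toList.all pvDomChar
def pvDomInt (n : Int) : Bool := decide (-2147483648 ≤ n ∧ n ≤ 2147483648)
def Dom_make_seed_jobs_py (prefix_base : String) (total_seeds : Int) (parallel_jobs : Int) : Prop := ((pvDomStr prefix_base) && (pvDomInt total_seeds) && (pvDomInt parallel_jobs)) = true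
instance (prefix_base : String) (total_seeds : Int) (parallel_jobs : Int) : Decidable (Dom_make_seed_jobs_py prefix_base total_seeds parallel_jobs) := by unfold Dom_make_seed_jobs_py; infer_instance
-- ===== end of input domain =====

-- B replaces A's running seed0 accumulator by the closed-form start j*base + min j rem and a stateless map (alternative decomposition, same cost).

-- ===== PORT A =====
-- f"{n:02d}" for the values reached here: zero-pad the decimal string to width 2 (exact for all inputs of width ≤ 2 and all nonnegative n)
def pvPad2 (n : Int) : List Char :=
  let s := (PySem.Int.toStr n).toList
  if s.length < 2 then List.replicate (2 - s.length) '0' ++ s else s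

-- loop body of A: state (jobs, seed0)
def pvAStep (prefix_base : String) (base rem : Int)
    (st : List (String × Int × Int) × Int) (j : Int) : List (String × Int × Int) × Int :=
  let runs_job := base + (if j < rem then 1 else 0)
  if runs_job ≤ 0 then st
  else
    let start := st.2
    let stop := st.2 + runs_job - 1
    let suffix := 's' :: (pvPad2 start ++ '_' :: pvPad2 stop)
    (st.1 ++ [(String.ofList (prefix_base.toList ++ '_' :: suffix), st.2, runs_job)], st.2 + runs_job)

def make_seed_jobs_py (prefix_base : String) (total_seeds : Int) (parallel_jobs : Int) : List (String × Int × Int) :=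
  let total := total_seeds
  if total ≤ 0 then []
  else
    let nj := min (max 1 parallel_jobs) total
    let base := PySem.Int.floordiv total nj
    let rem := PySem.Int.mod total nj
    ((PySem.List.pyRange 0 nj 1).foldl (pvAStep prefix_base base rem) ([], 0)).1

-- ===== PORT B =====
def pvJob (prefix_base : String) (base rem : Int) (j : Int) : String × Int × Int :=
  let start := j * base + min j rem
  let runs := base + (if j < rem then 1 else 0)
  (String.ofList (prefix_base.toList ++ '_' :: 's' :: (pvPad2 start ++ '_' :: pvPad2 (start + runs - 1))), start, runs)

def make_seed_jobs_py_alt (prefix_base : String) (total_seeds : Int) (parallel_jobs : Int) : List (String × Int × Int) :=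
  if total_seeds ≤ 0 then []
  else
    let nj := min (max 1 parallel_jobs) total_seeds
    let base := PySem.Int.floordiv total_seeds nj
    let rem := PySem.Int.mod total_seeds nj
    (PySem.List.pyRange 0 nj 1).map (pvJob prefix_base base rem)

-- ===== PRECONDITION & SPEC =====
def Spec_make_seed_jobs_py (prefix_base : String) (total_seeds : Int) (parallel_jobs : Int) (out : List (String × Int × Int)) : Prop := out = make_seed_jobs_py_alt prefix_base total_seeds parallel_jobs
instance (prefix_base : String) (total_seeds : Int) (parallel_jobs : Int) (out : List (String × Int × Int)) : Decidable (Spec_make_seed_jobs_py prefix_base total_seeds parallel_jobs out) := by unfold Spec_make_seed_jobs_py; infer_instance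

-- ===== CLAIM (what is proved, stated in full; the proofs are below) =====
def Claim_equal_make_seed_jobs_py : Prop := ∀ (prefix_base : String) (total_seeds : Int) (parallel_jobs : Int), Dom_make_seed_jobs_py prefix_base total_seeds parallel_jobs → Spec_make_seed_jobs_py prefix_base total_seeds parallel_jobs (make_seed_jobs_py prefix_base total_seeds parallel_jobs)

-- ===== LEMMAS AND PROOFS =====

-- Loop invariant: after the first k iterations, jobs is the map of pvJob over the range
-- and seed0 equals the closed form k*base + min k rem.
lemma pv_loop_eq (prefix_base : String) (base rem : Int) (hbase : 1 ≤ base) (hrem : 0 ≤ rem)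
    (k : Nat) :
    (PySem.List.pyRange 0 (k : Int) 1).foldl (pvAStep prefix_base base rem) ([], 0)
      = ((PySem.List.pyRange 0 (k : Int) 1).map (pvJob prefix_base base rem),
         (k : Int) * base + min (k : Int) rem) := by
  induction k with
  | zero => simp [PySem.List.pyRange_one_eq_nil, min_eq_left hrem]
  | succ k ih =>
      have hk : (0 : Int) ≤ (k : Int) := by positivity
      have hsplit := PySem.List.pyRange_one_succ_right (a := 0) (b := (k : Int)) hk
      push_cast
      rw [hsplit, List.foldl_append, List.map_append, ih]
      have hrun : ¬ (base + (if (k : Int) < rem then 1 else 0) ≤ 0) := by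
        split_ifs <;> omega
      simp only [List.foldl, pvAStep, hrun, ite_false, List.map, pvJob]
      rw [Prod.mk.injEq]
      refine ⟨rfl, ?_⟩
      rw [add_one_mul]
      set t := (k : Int) * base
      split_ifs <;> omega

-- ===== VERDICT (by name: the statement is the Claim_ definition above) =====
theorem make_seed_jobs_py_spec : Claim_equal_make_seed_jobs_py := by
  intro prefix_base total_seeds parallel_jobs _
  unfold Spec_make_seed_jobs_py make_seed_jobs_py make_seed_jobs_py_alt
  by_cases ht : total_seeds ≤ 0
  · simp [ht]
  · simp only [if_neg ht]
    set nj := min (max 1 parallel_jobs) total_seeds with hnj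
    have hnj1 : 1 ≤ nj := by
      have : 1 ≤ total_seeds := by omega
      simp [hnj]; omega
    have hnjle : nj ≤ total_seeds := min_le_right _ _
    have hnjpos : (0 : Int) < nj := by omega
    have hbase : 1 ≤ PySem.Int.floordiv total_seeds nj := by
      rw [PySem.Int.le_floordiv_iff_mul_le hnjpos]; omega
    have hrem : 0 ≤ PySem.Int.mod total_seeds nj := PySem.Int.mod_nonneg _ hnjpos
    have hcast : nj = ((nj.toNat : Int)) := (Int.toNat_of_nonneg hnjpos.le).symm
    rw [hcast] at hbase hrem ⊢
    rw [pv_loop_eq _ _ _ hbase hrem]
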